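-- pv_equiv track=rewrite | github.com/yuzequn095/AI-Statistical-Approaches | 151pa4/kernel.py | string_kernel
-- ===== SOURCE A (Python) =====
-- from collections import defaultdict
--
-- def string_kernel(s, t, p):
--     count = 0
--     s_dic = defaultdict(int)
--     t_dic = defaultdict(int)
--     # loop
--     for ind_s in range(len(s) - p + 1):
--         s_idx = s[ind_s:ind_s + p]
--         s_dic[s_idx] += 1
--     for ind_t in range(len(t) - p + 1):
--         t_idx = t[ind_t:ind_t + p]
--         t_dic[t_idx] += 1
--
--     for k, v in s_dic.items():
--         if k in t_dic:
--             count += v * t_dic[k]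
--     return count
-- ===== SOURCE B (Python) =====
-- def string_kernel(s, t, p):
--     # sort both p-gram occurrence lists, then one merge pass multiplying run lengths
--     sg = sorted([s[i:i + p] for i in range(len(s) - p + 1)])
--     tg = sorted([t[j:j + p] for j in range(len(t) - p + 1)])
--     total = 0
--     i, j = 0, 0
--     while i < len(sg) and j < len(tg):
--         g = sg[i]
--         h = tg[j]
--         if g < h:
--             i += 1
--         elif h < g:
--             j += 1
--         else:
--             i2 = i
--             while i2 < len(sg) and sg[i2] == g:
--                 i2 += 1
--             j2 = j
--             while j2 < len(tg) and tg[j2] == g: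
--                 j2 += 1
--             total += (i2 - i) * (j2 - j)
--             i, j = i2, j2
--     return total
-- ===== Notes on version B (the rewrite author's own statement) =====
-- stated objective: alternative
-- what changed: B replaces A's two hash dictionaries and distinct-key pass by sorting the two p-gram occurrence lists and counting matches in a single two-pointer merge that multiplies equal-run lengths.
import Mathlib
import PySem

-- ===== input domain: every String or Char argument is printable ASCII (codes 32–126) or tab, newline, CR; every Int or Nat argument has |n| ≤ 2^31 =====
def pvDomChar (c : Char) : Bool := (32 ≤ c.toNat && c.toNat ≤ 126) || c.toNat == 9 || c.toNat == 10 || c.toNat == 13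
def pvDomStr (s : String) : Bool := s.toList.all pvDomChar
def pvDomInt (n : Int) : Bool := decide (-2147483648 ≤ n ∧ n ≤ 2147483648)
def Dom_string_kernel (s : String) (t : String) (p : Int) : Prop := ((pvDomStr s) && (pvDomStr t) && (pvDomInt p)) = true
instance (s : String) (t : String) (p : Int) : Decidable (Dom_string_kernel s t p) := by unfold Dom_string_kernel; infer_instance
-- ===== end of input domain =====

-- B replaces A's two dictionaries and distinct-key pass by a different algorithm: sort both p-gram
-- occurrence lists, then count matches in one two-pointer merge multiplying equal-run lengths
-- (objective: alternative).

-- ===== PORT A =====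
def string_kernel (s : String) (t : String) (p : Int) : Int :=
  let sL := s.toList
  let tL := t.toList
  let s_dic : PySem.Dict (List Char) Int :=
    (PySem.List.pyRange 0 ((sL.length : Int) - p + 1) 1).foldl
      (fun d i => d.modify (PySem.List.slice sL (some i) (some (i + p))) 0 (· + 1))
      PySem.Dict.empty
  let t_dic : PySem.Dict (List Char) Int :=
    (PySem.List.pyRange 0 ((tL.length : Int) - p + 1) 1).foldl
      (fun d i => d.modify (PySem.List.slice tL (some i) (some (i + p))) 0 (· + 1))
      PySem.Dict.empty
  s_dic.items.foldl
    (fun count kv => if t_dic.contains kv.1 then count + kv.2 * t_dic.getD kv.1 0 else count)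
    0

-- ===== PORT B =====
-- B-side helpers: the inner run-skipping while loop and the outer merge while loop of Source B.
def pvRunEnd (l : Array (List Char)) (g : List Char) (i : Nat) : Nat :=
  if h : i < l.size ∧ l.getD i [] = g then pvRunEnd l g (i + 1) else i
termination_by l.size - i
decreasing_by omega

lemma pvRunEnd_ge (l : Array (List Char)) (g : List Char) (i : Nat) : i ≤ pvRunEnd l g i := by
  induction i using pvRunEnd.induct l g with
  | case1 i h ih => rw [pvRunEnd, dif_pos h]; omega
  | case2 i h => rw [pvRunEnd, dif_neg h]

lemma pvRunEnd_le (l : Array (List Char)) (g : List Char) (i : Nat) (hi : i ≤ l.size) :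
    pvRunEnd l g i ≤ l.size := by
  induction i using pvRunEnd.induct l g with
  | case1 i h ih => rw [pvRunEnd, dif_pos h]; exact ih h.1
  | case2 i h => rw [pvRunEnd, dif_neg h]; exact hi

lemma pvRunEnd_gt (l : Array (List Char)) (g : List Char) (i : Nat)
    (h1 : i < l.size) (h2 : l.getD i [] = g) : i < pvRunEnd l g i := by
  rw [pvRunEnd, dif_pos ⟨h1, h2⟩]
  have := pvRunEnd_ge l g (i + 1)
  omega

def pvMergeLoop (sg tg : Array (List Char)) (i j : Nat) (total : Int) : Int :=
  if _hij : i < sg.size ∧ j < tg.size then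
    let g := sg.getD i []
    let h := tg.getD j []
    if g < h then pvMergeLoop sg tg (i + 1) j total
    else if h < g then pvMergeLoop sg tg i (j + 1) total
    else
      let i2 := pvRunEnd sg g i
      let j2 := pvRunEnd tg g j
      pvMergeLoop sg tg i2 j2 (total + ((i2 : Int) - (i : Int)) * ((j2 : Int) - (j : Int)))
  else total
termination_by (sg.size - i) + (tg.size - j)
decreasing_by
  · omega
  · omega
  · have h1 := pvRunEnd_gt sg (sg.getD i []) i _hij.1 rfl
    have h2 := pvRunEnd_le sg (sg.getD i []) i (by omega)
    have h3 := pvRunEnd_ge tg (sg.getD i []) j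
    have h4 := pvRunEnd_le tg (sg.getD i []) j (by omega)
    omega

def string_kernel_alt (s : String) (t : String) (p : Int) : Int :=
  let sL := s.toList
  let tL := t.toList
  let sg := ((PySem.List.pyRange 0 ((sL.length : Int) - p + 1) 1).map
      (fun i => PySem.List.slice sL (some i) (some (i + p)))).mergeSort
      (fun a b => decide (a ≤ b)) |>.toArray
  let tg := ((PySem.List.pyRange 0 ((tL.length : Int) - p + 1) 1).map
      (fun j => PySem.List.slice tL (some j) (some (j + p)))).mergeSort
      (fun a b => decide (a ≤ b)) |>.toArray
  pvMergeLoop sg tg 0 0 0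

-- ===== PRECONDITION & SPEC =====
def Spec_string_kernel (s : String) (t : String) (p : Int) (out : Int) : Prop := out = string_kernel_alt s t p
instance (s : String) (t : String) (p : Int) (out : Int) : Decidable (Spec_string_kernel s t p out) := by unfold Spec_string_kernel; infer_instance

-- ===== CLAIM (what is proved, stated in full; the proofs are below) =====
def Claim_equal_string_kernel : Prop := ∀ (s : String) (t : String) (p : Int), Dom_string_kernel s t p → Spec_string_kernel s t p (string_kernel s t p)

-- ===== LEMMAS AND PROOFS =====

-- the list of p-gram occurrences of L
def pvGrams (L : List Char) (p : Int) : List (List Char) :=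
  (PySem.List.pyRange 0 ((L.length : Int) - p + 1) 1).map
    (fun i => PySem.List.slice L (some i) (some (i + p)))

-- Σ_{g ∈ a} (count of g in b)
def pvK (a b : List (List Char)) : Int := (a.map (fun g => (b.count g : Int))).sum

lemma pvFold_slice {γ : Type} (L : List Char) (p : Int) (f : γ → List Char → γ) (init : γ) :
    (PySem.List.pyRange 0 ((L.length : Int) - p + 1) 1).foldl
        (fun acc i => f acc (PySem.List.slice L (some i) (some (i + p)))) init
      = (pvGrams L p).foldl f init := by
  unfold pvGrams
  rw [List.foldl_map]

lemma pvStep_eq (gb : List (List Char)) (x c : Int) (k : List Char) :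
    (if (PySem.Dict.counter gb).contains k then c + x * (PySem.Dict.counter gb).getD k 0 else c)
      = c + x * (gb.count k : Int) := by
  rw [PySem.Dict.contains_counter, PySem.Dict.getD_counter]
  by_cases h : gb.contains k = true
  · rw [if_pos h]
  · have hc : gb.count k = 0 := List.count_eq_zero.mpr (by simpa using h)
    rw [if_neg h, hc]
    simp

lemma pvA_eq (s t : String) (p : Int) :
    string_kernel s t p =
      ((PySem.Set.ofList (pvGrams s.toList p)).map
        (fun k => ((pvGrams s.toList p).count k : Int) * ((pvGrams t.toList p).count k : Int))).sum := by
  simp only [string_kernel]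
  rw [pvFold_slice (γ := PySem.Dict (List Char) Int) s.toList p (fun d g => d.modify g 0 (· + 1)) PySem.Dict.empty,
      pvFold_slice (γ := PySem.Dict (List Char) Int) t.toList p (fun d g => d.modify g 0 (· + 1)) PySem.Dict.empty,
      ← PySem.Dict.counter_eq_foldl, ← PySem.Dict.counter_eq_foldl,
      PySem.Dict.items_counter, List.foldl_map]
  simp only [pvStep_eq]
  rw [PySem.List.foldl_add]
  simp

-- counting identity: summing products over distinct s-grams = summing t-counts over all s-grams
lemma pvKernel_eq (a b : List (List Char)) :
    ((PySem.Set.ofList a).map (fun k => ((a.count k : Int) * (b.count k : Int)))).sum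
      = pvK a b := by
  unfold pvK
  rw [← List.sum_toFinset _ (PySem.Set.nodup_ofList a)]
  have hfin : (PySem.Set.ofList a).toFinset = a.toFinset := by
    ext x; simp [PySem.Set.mem_ofList]
  rw [hfin, Finset.sum_list_map_count a]
  rw [show (instBEqOfDecidableEq : BEq (List Char)) = List.instBEq from
    lawful_beq_subsingleton _ _]
  refine Finset.sum_congr rfl ?_
  intro x _
  rw [nsmul_eq_mul]

lemma pvArr_getD (xs : List (List Char)) (i : Nat) : xs.toArray.getD i [] = xs.getD i [] := by
  by_cases h : i < xs.length
  · rw [Array.getD, dif_pos (by simpa using h), List.getD_eq_getElem xs [] h]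
    simp
  · rw [Array.getD, dif_neg (by simpa using h), List.getD_eq_default xs [] (by omega)]

-- pvRunEnd walks exactly over the leading run of g
lemma pvRunEnd_eq (l : List (List Char)) (g : List Char) (i : Nat) :
    pvRunEnd l.toArray g i = i + ((l.drop i).takeWhile (fun x => x == g)).length := by
  induction i using pvRunEnd.induct l.toArray g with
  | case1 i h ih =>
    rw [pvRunEnd, dif_pos h, ih]
    obtain ⟨h1, h2⟩ := h
    rw [List.size_toArray] at h1
    rw [pvArr_getD] at h2
    have hd : l.drop i = l[i] :: l.drop (i + 1) := List.drop_eq_getElem_cons h1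
    have hg : l[i] = g := by rwa [List.getD_eq_getElem l [] h1] at h2
    rw [hd, List.takeWhile_cons, hg]
    simp
    omega
  | case2 i h =>
    rw [pvRunEnd, dif_neg h]
    rw [List.size_toArray, pvArr_getD] at h
    by_cases hlen : i < l.length
    · have hne : ¬ l.getD i [] = g := by tauto
      have hd : l.drop i = l[i] :: l.drop (i + 1) := List.drop_eq_getElem_cons hlen
      rw [List.getD_eq_getElem l [] hlen] at hne
      rw [hd, List.takeWhile_cons]
      simp [hne]
    · rw [List.drop_eq_nil_of_le (by omega)]
      simp

-- the suffix decomposition at a run: drop i = replicate (runEnd - i) g ++ drop runEnd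
lemma pvRun_decomp (l : List (List Char)) (g : List Char) (i : Nat) :
    l.drop i = List.replicate (pvRunEnd l.toArray g i - i) g ++ l.drop (pvRunEnd l.toArray g i) := by
  have he := pvRunEnd_eq l g i
  set tw := (l.drop i).takeWhile (fun x => x == g) with htw
  have h1 : tw = List.replicate tw.length g := by
    apply List.eq_replicate_of_mem
    intro b hb
    have := List.mem_takeWhile_imp (htw ▸ hb)
    simpa using this
  have h2 : l.drop (pvRunEnd l.toArray g i) = (l.drop i).dropWhile (fun x => x == g) := by
    rw [he, ← List.drop_drop]
    conv_lhs => rw [← List.takeWhile_append_dropWhile (p := fun x => x == g) (l := l.drop i)]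
    rw [← htw, List.drop_left]
  rw [h2, show pvRunEnd l.toArray g i - i = tw.length by omega, ← h1]
  conv_lhs => rw [← List.takeWhile_append_dropWhile (p := fun x => x == g) (l := l.drop i)]

lemma pvDrop_runEnd (l : List (List Char)) (g : List Char) (i : Nat) :
    l.drop (pvRunEnd l.toArray g i) = (l.drop i).dropWhile (fun x => x == g) := by
  have he := pvRunEnd_eq l g i
  set tw := (l.drop i).takeWhile (fun x => x == g) with htw
  rw [he, ← List.drop_drop]
  conv_lhs => rw [← List.takeWhile_append_dropWhile (p := fun x => x == g) (l := l.drop i)]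
  rw [← htw, List.drop_left]

-- after the run, in a sorted suffix whose elements all dominate g, nothing equals g
lemma pvDropWhile_ne (l' : List (List Char)) (g : List Char)
    (hp : l'.Pairwise (· ≤ ·)) (hall : ∀ x ∈ l', g ≤ x) :
    ∀ x ∈ l'.dropWhile (fun y => y == g), x ≠ g := by
  cases hd : l'.dropWhile (fun y => y == g) with
  | nil => intro x hx; simp at hx
  | cons e rest =>
    have hsub : (e :: rest).Sublist l' := hd ▸ (List.dropWhile_sublist _)
    have hpd : (e :: rest).Pairwise (· ≤ ·) := hp.sublist hsub
    have heg : e ≠ g := by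
      have h0 := List.head_dropWhile_not (fun y => y == g) (l := l') (w := by rw [hd]; simp)
      simp only [hd, List.head_cons] at h0
      simpa using h0
    have hge : g ≤ e := hall e (hsub.mem (by simp))
    have hlt : g < e := lt_of_le_of_ne hge (Ne.symm heg)
    intro x hx
    rcases List.mem_cons.mp hx with rfl | hxr
    · exact heg
    · have : e ≤ x := (List.pairwise_cons.mp hpd).1 x hxr
      exact fun hxg => absurd (hxg ▸ this) (not_le.mpr hlt)

lemma pvK_nil_right (a : List (List Char)) : pvK a [] = 0 := by
  unfold pvK
  simp

lemma pvK_cons_right (a : List (List Char)) (c : List Char) (b : List (List Char))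
    (h : ∀ x ∈ a, x ≠ c) : pvK a (c :: b) = pvK a b := by
  unfold pvK
  congr 1
  apply List.map_congr_left
  intro x hx
  rw [List.count_cons]
  have : ¬ (c == x) = true := by simpa using (h x hx).symm
  simp [this]

-- the merge loop computes Σ over the remaining s-grams of the count in the remaining t-grams
lemma pvMergeLoop_eq (sg tg : List (List Char))
    (hs : sg.Pairwise (· ≤ ·)) (ht : tg.Pairwise (· ≤ ·)) :
    ∀ (n i j : Nat) (total : Int), (sg.length - i) + (tg.length - j) ≤ n →
      pvMergeLoop sg.toArray tg.toArray i j total = total + pvK (sg.drop i) (tg.drop j) := by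
  intro n
  induction n with
  | zero =>
    intro i j total hn
    rw [pvMergeLoop]
    simp only [List.size_toArray]
    have hi : sg.length ≤ i := by omega
    rw [dif_neg (by omega), List.drop_eq_nil_of_le hi]
    unfold pvK
    simp
  | succ n ih =>
    intro i j total hn
    rw [pvMergeLoop]
    simp only [List.size_toArray]
    by_cases hij : i < sg.length ∧ j < tg.length
    case neg =>
      rw [dif_neg hij]
      rcases not_and_or.mp hij with hi | hj
      · rw [List.drop_eq_nil_of_le (by omega)]
        unfold pvK; simp
      · rw [List.drop_eq_nil_of_le (as := tg) (by omega), pvK_nil_right]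
        simp
    case pos =>
      rw [dif_pos hij]
      obtain ⟨hi, hj⟩ := hij
      have hdi : sg.drop i = sg[i] :: sg.drop (i + 1) := List.drop_eq_getElem_cons hi
      have hdj : tg.drop j = tg[j] :: tg.drop (j + 1) := List.drop_eq_getElem_cons hj
      have hgd : sg.toArray.getD i [] = sg[i] := by
        rw [pvArr_getD]; exact List.getD_eq_getElem sg [] hi
      have hhd : tg.toArray.getD j [] = tg[j] := by
        rw [pvArr_getD]; exact List.getD_eq_getElem tg [] hj
      simp only [hgd, hhd]
      have hpi : (sg.drop i).Pairwise (· ≤ ·) := hs.drop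
      have hpj : (tg.drop j).Pairwise (· ≤ ·) := ht.drop
      by_cases hgh : sg[i] < tg[j]
      · rw [if_pos hgh, ih i.succ j total (by omega), hdi]
        have hz : (tg.drop j).count sg[i] = 0 := by
          apply List.count_eq_zero.mpr
          intro hmem
          rw [hdj] at hmem
          rcases List.mem_cons.mp hmem with he | hr
          · exact absurd (he ▸ hgh) (lt_irrefl _)
          · have : tg[j] ≤ sg[i] := (List.pairwise_cons.mp (hdj ▸ hpj)).1 _ hr
            exact absurd (lt_of_lt_of_le hgh this) (lt_irrefl _)
        unfold pvK
        rw [List.map_cons, List.sum_cons, hz]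
        push_cast
        ring
      · rw [if_neg hgh]
        by_cases hhg : tg[j] < sg[i]
        · rw [if_pos hhg, ih i j.succ total (by omega), hdj]
          rw [pvK_cons_right]
          intro x hx
          have hgx : sg[i] ≤ x := by
            rw [hdi] at hx
            rcases List.mem_cons.mp hx with rfl | hr
            · exact le_refl _
            · exact (List.pairwise_cons.mp (hdi ▸ hpi)).1 _ hr
          exact fun hxe => absurd (hxe ▸ hgx) (not_le.mpr hhg)
        · -- equal heads: multiply the run lengths
          rw [if_neg hhg]
          have heq : tg[j] = sg[i] := le_antisymm (not_lt.mp hgh) (not_lt.mp hhg)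
          set g := sg[i] with hgdef
          have hj2g : tg.toArray.getD j [] = g := by rw [hhd, heq]
          have hi2gt : i < pvRunEnd sg.toArray g i :=
            pvRunEnd_gt sg.toArray g i (by simpa using hi) (by rw [hgd])
          have hj2gt : j < pvRunEnd tg.toArray g j :=
            pvRunEnd_gt tg.toArray g j (by simpa using hj) hj2g
          have hi2le : pvRunEnd sg.toArray g i ≤ sg.length := by
            have := pvRunEnd_le sg.toArray g i (by simpa using le_of_lt hi)
            simpa using this
          have hj2le : pvRunEnd tg.toArray g j ≤ tg.length := by
            have := pvRunEnd_le tg.toArray g j (by simpa using le_of_lt hj)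
            simpa using this
          rw [ih (pvRunEnd sg.toArray g i) (pvRunEnd tg.toArray g j) _ (by omega)]
          have hallS : ∀ x ∈ sg.drop i, g ≤ x := by
            intro x hx
            rw [hdi] at hx
            rcases List.mem_cons.mp hx with rfl | hr
            · exact le_refl _
            · exact (List.pairwise_cons.mp (hdi ▸ hpi)).1 _ hr
          have hallT : ∀ x ∈ tg.drop j, g ≤ x := by
            intro x hx
            rw [hdj] at hx
            rcases List.mem_cons.mp hx with rfl | hr
            · exact le_of_eq heq.symm
            · exact le_trans (le_of_eq heq.symm) ((List.pairwise_cons.mp (hdj ▸ hpj)).1 _ hr)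
          have hdecS := pvRun_decomp sg g i
          have hdecT := pvRun_decomp tg g j
          have hneS : ∀ x ∈ sg.drop (pvRunEnd sg.toArray g i), x ≠ g := by
            rw [pvDrop_runEnd]
            exact pvDropWhile_ne _ g hpi hallS
          have hneT : ∀ x ∈ tg.drop (pvRunEnd tg.toArray g j), x ≠ g := by
            rw [pvDrop_runEnd]
            exact pvDropWhile_ne _ g hpj hallT
          -- compute pvK (sg.drop i) (tg.drop j)
          have hcount : ((tg.drop j).count g : Int) = ((pvRunEnd tg.toArray g j : Int) - j) := by
            rw [hdecT, List.count_append, List.count_replicate,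
                List.count_eq_zero.mpr (fun hmem => (hneT g hmem) rfl)]
            simp
            omega
          have hKsplit : pvK (sg.drop i) (tg.drop j)
              = ((pvRunEnd sg.toArray g i : Int) - i) * ((pvRunEnd tg.toArray g j : Int) - j)
                + pvK (sg.drop (pvRunEnd sg.toArray g i)) (tg.drop (pvRunEnd tg.toArray g j)) := by
            conv_lhs => rw [hdecS]
            unfold pvK
            rw [List.map_append, List.sum_append, List.map_replicate, List.sum_replicate,
                nsmul_eq_mul]
            have h1 : ((pvRunEnd sg.toArray g i - i : Nat) : Int) = (pvRunEnd sg.toArray g i : Int) - i := by omega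
            rw [h1, hcount]
            congr 1
            -- Σ over the tail: counts in tg.drop j = counts in tg.drop j2, since tail elems ≠ g
            have : ∀ x ∈ sg.drop (pvRunEnd sg.toArray g i),
                ((tg.drop j).count x : Int) = ((tg.drop (pvRunEnd tg.toArray g j)).count x : Int) := by
              intro x hx
              rw [hdecT, List.count_append, List.count_replicate,
                  if_neg (by simpa using fun h => (hneS x hx) h.symm)]
              simp
            exact congrArg List.sum (List.map_congr_left this)
          rw [hKsplit]
          ring
-- B's p-gram lists (sorted) and the raw occurrence lists count alike
lemma pvB_eq (s t : String) (p : Int) :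
    string_kernel_alt s t p = pvK (pvGrams s.toList p) (pvGrams t.toList p) := by
  simp only [string_kernel_alt]
  rw [show (PySem.List.pyRange 0 ((s.toList.length : Int) - p + 1) 1).map
        (fun i => PySem.List.slice s.toList (some i) (some (i + p))) = pvGrams s.toList p from rfl,
      show (PySem.List.pyRange 0 ((t.toList.length : Int) - p + 1) 1).map
        (fun j => PySem.List.slice t.toList (some j) (some (j + p))) = pvGrams t.toList p from rfl]
  set sg := (pvGrams s.toList p).mergeSort (fun a b => decide (a ≤ b)) with hsg
  set tg := (pvGrams t.toList p).mergeSort (fun a b => decide (a ≤ b)) with htg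
  have htrans : ∀ a b c : List Char, decide (a ≤ b) = true → decide (b ≤ c) = true →
      decide (a ≤ c) = true := by
    intro a b c h1 h2
    simp only [decide_eq_true_iff] at *
    exact le_trans h1 h2
  have htot : ∀ a b : List Char, (decide (a ≤ b) || decide (b ≤ a)) = true := by
    intro a b
    simpa using le_total a b
  have hs : sg.Pairwise (· ≤ ·) := by
    rw [hsg]
    exact (List.pairwise_mergeSort htrans htot _).imp (by simp)
  have ht : tg.Pairwise (· ≤ ·) := by
    rw [htg]
    exact (List.pairwise_mergeSort htrans htot _).imp (by simp)
  rw [pvMergeLoop_eq sg tg hs ht (sg.length + tg.length) 0 0 0 (by omega)]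

  simp only [List.drop_zero, zero_add]
  -- pvK is invariant under permutation of both lists
  have hps : sg.Perm (pvGrams s.toList p) := List.mergeSort_perm _ _
  have hpt : tg.Perm (pvGrams t.toList p) := List.mergeSort_perm _ _
  unfold pvK
  have h1 : sg.map (fun g => ((tg.count g : Int)))
      = sg.map (fun g => (((pvGrams t.toList p).count g : Int))) := by
    apply List.map_congr_left
    intro x _
    rw [hpt.count_eq]
  rw [h1]
  exact (hps.map _).sum_eq

-- ===== VERDICT (by name: the statement is the Claim_ definition above) =====
theorem string_kernel_spec : Claim_equal_string_kernel := by
  intro s t p _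
  unfold Spec_string_kernel
  rw [pvA_eq, pvB_eq]
  exact pvKernel_eq _ _
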